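-- pv_equiv track=rewrite | github.com/huyuan95/Learn-Python | data structure/ch04/C4_18.py | v_c
-- ===== SOURCE A (Python) =====
-- def v_c(s, v=0, c=0):
--     if len(s) == 0:
--         if v >= c:
--             return True
--         else:
--             return False
--     if s[0] in ['a', 'e','i','o','u']:
--         return v_c(s[1:], v+1, c)
--     else:
--         return v_c(s[1:], v, c+1)
-- ===== SOURCE B (Python) =====
-- def v_c(s, v=0, c=0):
--     for ch in s:
--         if ch in ('a', 'e', 'i', 'o', 'u'):
--             v += 1
--         else:
--             c += 1
--     return v >= c
-- ===== Notes on version B (the rewrite author's own statement) =====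
-- stated objective: faster
-- what changed: Replaces A's character-by-character recursion with string slicing (each step copies the rest of the string) by a single iterative loop that accumulates the two counters and compares once at the end.
import Mathlib
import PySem

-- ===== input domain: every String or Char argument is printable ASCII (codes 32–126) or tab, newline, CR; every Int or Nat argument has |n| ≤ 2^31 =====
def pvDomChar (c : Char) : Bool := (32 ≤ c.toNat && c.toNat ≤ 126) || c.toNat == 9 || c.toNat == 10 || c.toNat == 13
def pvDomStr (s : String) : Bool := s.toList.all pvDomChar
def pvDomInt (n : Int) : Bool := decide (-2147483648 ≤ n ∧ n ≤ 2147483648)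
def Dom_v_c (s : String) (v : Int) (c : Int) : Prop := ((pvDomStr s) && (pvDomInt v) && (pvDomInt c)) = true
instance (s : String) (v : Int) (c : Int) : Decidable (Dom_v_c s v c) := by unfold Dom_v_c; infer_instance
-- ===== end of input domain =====

-- B replaces A's recursion-with-slicing by one iterative pass (a fold) over the characters; return values agree everywhere.

-- ===== PORT A =====
-- A recurses on s: empty → compare counts, else test s[0] against the vowel list and recurse on s[1:].
def vcRecA : List Char → Int → Int → Bool
  | [], v, c => if v ≥ c then true else false
  | h :: t, v, c =>
      if h ∈ ['a', 'e', 'i', 'o', 'u'] then vcRecA t (v + 1) c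
      else vcRecA t v (c + 1)

def v_c (s : String) (v : Int) (c : Int) : Bool := vcRecA s.toList v c

-- ===== PORT B =====
-- B iterates once over the characters accumulating (v, c), then returns v >= c.
def vcStep (p : Int × Int) (ch : Char) : Int × Int :=
  if ch ∈ ['a', 'e', 'i', 'o', 'u'] then (p.1 + 1, p.2) else (p.1, p.2 + 1)

def v_c_alt (s : String) (v : Int) (c : Int) : Bool :=
  let p := s.toList.foldl vcStep (v, c)
  decide (p.1 ≥ p.2)

-- ===== PRECONDITION & SPEC =====
def Spec_v_c (s : String) (v : Int) (c : Int) (out : Bool) : Prop := out = v_c_alt s v c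
instance (s : String) (v : Int) (c : Int) (out : Bool) : Decidable (Spec_v_c s v c out) := by unfold Spec_v_c; infer_instance

-- ===== CLAIM (what is proved, stated in full; the proofs are below) =====
def Claim_equal_v_c : Prop := ∀ (s : String) (v : Int) (c : Int), Dom_v_c s v c → Spec_v_c s v c (v_c s v c)

-- ===== LEMMAS AND PROOFS =====
theorem vcRecA_eq_foldl (l : List Char) : ∀ (v c : Int),
    vcRecA l v c = decide ((l.foldl vcStep (v, c)).1 ≥ (l.foldl vcStep (v, c)).2) := by
  induction l with
  | nil => intro v c; simp [vcRecA]
  | cons h t ih =>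
      intro v c
      by_cases hv : h ∈ ['a', 'e', 'i', 'o', 'u'] <;>
        simp [vcRecA, vcStep, hv, ih]

-- ===== VERDICT (by name: the statement is the Claim_ definition above) =====
theorem v_c_spec : Claim_equal_v_c := by
  intro s v c _
  unfold Spec_v_c v_c v_c_alt
  exact vcRecA_eq_foldl s.toList v c
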